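-- pv_equiv track=rewrite | github.com/decay71/multiACE | multiace/tools/post_process_virtual_toolheads.py | _suggest_layer_friendly_remap
-- ===== SOURCE A (Python) =====
-- def _suggest_layer_friendly_remap(layer_colors, num_aces):
--     """When the current T-index assignment causes same-head conflicts in
--     some layers, search for a remap of T-indices to head buckets that
--     eliminates all conflicts while requiring minimal physical
--     reordering.
--
--     Each color (= existing T-index) lives at head c%4 today. We may
--     reassign it to any head 0-3 (= new T-index k where k%4 = new_head).
--     Constraints:
--       - No two colors on the same head within any layer.
--       - Per-head color count <= num_aces.
--     Objective: minimize the number of colors moved off their current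
--     head (so the user has to physically rearrange as few cartridges as
--     possible).
--
--     Returns dict {old_T: new_T} or None if no feasible remap exists.
--     Brute-force over 4^N head assignments where N = #colors. Practical
--     up to ~12 colors (4^12 = ~17M).
--     """
--     colors = sorted({c for s in layer_colors for c in s})
--     n = len(colors)
--     if n == 0 or n > 12:
--         return None
--     current_head = {c: c % 4 for c in colors}
--
--     from itertools import product
--
--     best_assignment = None
--     best_moved = n + 1
--
--     layer_lists = [list(s) for s in layer_colors]
--
--     for assignment in product(range(4), repeat=n):
--         head_count = [0, 0, 0, 0]
--         for h in assignment:
--             head_count[h] += 1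
--         if any(c > num_aces for c in head_count):
--             continue
--
--         head_for_color = {colors[i]: assignment[i] for i in range(n)}
--         conflict = False
--         for layer_list in layer_lists:
--             heads_used = set()
--             for c in layer_list:
--                 h = head_for_color[c]
--                 if h in heads_used:
--                     conflict = True
--                     break
--                 heads_used.add(h)
--             if conflict:
--                 break
--         if conflict:
--             continue
--
--         moved = sum(1 for i, c in enumerate(colors)
--                     if assignment[i] != current_head[c])
--         if moved < best_moved:
--             best_moved = moved
--             best_assignment = assignment
--             if moved == 0:
--                 break
--
--     if best_assignment is None:
--         return None
--
--     head_groups = {h: [] for h in range(4)}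
--     for i, c in enumerate(colors):
--         head_groups[best_assignment[i]].append(c)
--     new_t = {}
--     for h, cs in head_groups.items():
--         used_aces = set()
--         for c in cs:
--             if c % 4 != h:
--                 continue
--             cur_ace = c // 4
--             if cur_ace not in used_aces and cur_ace < num_aces:
--                 new_t[c] = h + 4 * cur_ace
--                 used_aces.add(cur_ace)
--         for c in cs:
--             if c % 4 != h or c in new_t:
--                 continue
--             for ace in range(num_aces):
--                 if ace not in used_aces:
--                     new_t[c] = h + 4 * ace
--                     used_aces.add(ace)
--                     break
--         for c in cs:
--             if c in new_t:
--                 continue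
--             for ace in range(num_aces):
--                 if ace not in used_aces:
--                     new_t[c] = h + 4 * ace
--                     used_aces.add(ace)
--                     break
--
--     return new_t if any(v != k for k, v in new_t.items()) else None
-- ===== SOURCE B (Python) =====
-- def _suggest_layer_friendly_remap(layer_colors, num_aces):
--     """Branch-and-bound re-implementation: instead of scanning all 4^N head
--     assignments, assign colors[0..n-1] to heads 0-3 depth-first in the same
--     lexicographic order, pruning any branch whose partial assignment already
--     overfills a head, conflicts inside a layer, or cannot beat the best
--     moved-count found so far.  Same result as the brute-force scan."""
--     colors = sorted({c for s in layer_colors for c in s})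
--     n = len(colors)
--     if n == 0 or n > 12:
--         return None
--     layer_lists = [list(s) for s in layer_colors]
--     # each layer as positions into colors (every layer color is in colors)
--     layer_pos = [[colors.index(c) for c in layer] for layer in layer_lists]
--
--     best_assignment = None
--     best_moved = n + 1
--
--     def prefix_bad(prefix):
--         i = len(prefix)
--         for h in range(4):
--             if prefix.count(h) > num_aces:
--                 return True
--         for poss in layer_pos:
--             seen = set()
--             for j in poss:
--                 if j < i:
--                     if prefix[j] in seen:
--                         return True
--                     seen.add(prefix[j])
--         return False
--
--     def dfs(prefix, moved):
--         nonlocal best_assignment, best_moved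
--         if moved >= best_moved or prefix_bad(prefix):
--             return
--         if len(prefix) == n:
--             best_assignment = tuple(prefix)
--             best_moved = moved
--             return
--         c = colors[len(prefix)]
--         for h in range(4):
--             dfs(prefix + [h], moved + (1 if h != c % 4 else 0))
--
--     dfs([], 0)
--
--     if best_assignment is None:
--         return None
--
--     head_groups = {h: [] for h in range(4)}
--     for i, c in enumerate(colors):
--         head_groups[best_assignment[i]].append(c)
--     new_t = {}
--     for h, cs in head_groups.items():
--         used_aces = set()
--         for c in cs:
--             if c % 4 != h:
--                 continue
--             cur_ace = c // 4
--             if cur_ace not in used_aces and cur_ace < num_aces: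
--                 new_t[c] = h + 4 * cur_ace
--                 used_aces.add(cur_ace)
--         for c in cs:
--             if c % 4 != h or c in new_t:
--                 continue
--             for ace in range(num_aces):
--                 if ace not in used_aces:
--                     new_t[c] = h + 4 * ace
--                     used_aces.add(ace)
--                     break
--         for c in cs:
--             if c in new_t:
--                 continue
--             for ace in range(num_aces):
--                 if ace not in used_aces:
--                     new_t[c] = h + 4 * ace
--                     used_aces.add(ace)
--                     break
--
--     return new_t if any(v != k for k, v in new_t.items()) else None
-- ===== Notes on version B (the rewrite author's own statement) =====
-- stated objective: alternative
-- what changed: Replaces the flat scan over all 4^n head assignments (itertools.product) with a depth-first backtracking search in the same lexicographic order that prunes any prefix which already overfills a head, conflicts within a layer, or cannot beat the best moved-count found so far; the head_groups/new_t reconstruction is kept unchanged.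
import Mathlib
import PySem

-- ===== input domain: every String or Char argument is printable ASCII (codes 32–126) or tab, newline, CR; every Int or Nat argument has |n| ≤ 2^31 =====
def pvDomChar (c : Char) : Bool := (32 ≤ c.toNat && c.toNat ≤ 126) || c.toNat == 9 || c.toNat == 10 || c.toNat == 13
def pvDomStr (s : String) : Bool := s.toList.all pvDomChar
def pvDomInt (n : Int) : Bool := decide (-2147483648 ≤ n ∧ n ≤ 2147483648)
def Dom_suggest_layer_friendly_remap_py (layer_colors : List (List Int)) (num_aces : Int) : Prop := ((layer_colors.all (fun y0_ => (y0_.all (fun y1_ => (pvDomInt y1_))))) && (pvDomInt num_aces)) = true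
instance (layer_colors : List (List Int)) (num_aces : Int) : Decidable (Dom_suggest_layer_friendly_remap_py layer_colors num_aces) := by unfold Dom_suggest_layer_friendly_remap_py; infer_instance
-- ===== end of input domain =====

-- B replaces A's flat scan over all 4^n head assignments with a depth-first
-- branch-and-bound search (same lexicographic order, pruning overfull /
-- conflicting / not-improving prefixes); the head_groups/new_t reconstruction
-- block is identical in both Pythons and is therefore ported once (pvRebuild),
-- as are the shared first lines computing the sorted color set (pvColors).

-- ===== SHARED HELPERS (code identical in Source A and Source B) =====

-- colors = sorted({c for s in layer_colors for c in s})
def pvColors (layer_colors : List (List Int)) : List Int :=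
  PySem.List.sorted (PySem.Set.ofList (layer_colors.flatMap (fun s => s))) (fun x => x) false

-- c % 4  (current/assigned head of a color)
def pvHead (c : Int) : Int := PySem.Int.mod c 4

-- 'for ace in range(num_aces): if ace not in used: …; break' — first free ace;
-- fuel = num_aces (evaluation stops at the first free ace, ≤ |used|+1 steps);
-- none = the loop ends without break (then Python adds no entry for c)
def pvFindFreeAce (used : PySem.Set Int) (ace : Int) : Nat → Option Int
  | 0 => none
  | fuel + 1 =>
    if PySem.Set.contains used ace then pvFindFreeAce used (ace + 1) fuel else some ace

-- the per-head body of the reconstruction loop 'for h, cs in head_groups.items()':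
-- three passes over cs threading (new_t, used_aces)
def pvAssignHead (num_aces : Int) (h : Int) (cs : List Int)
    (new_t : PySem.Dict Int Int) : PySem.Dict Int Int :=
  let st1 := cs.foldl (fun (st : PySem.Dict Int Int × PySem.Set Int) c =>
      if pvHead c != h then st
      else
        let cur_ace := PySem.Int.floordiv c 4
        if !(PySem.Set.contains st.2 cur_ace) && decide (cur_ace < num_aces) then
          (st.1.insert c (h + 4 * cur_ace), PySem.Set.add st.2 cur_ace)
        else st)
    (new_t, PySem.Set.empty)
  let st2 := cs.foldl (fun (st : PySem.Dict Int Int × PySem.Set Int) c =>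
      if pvHead c != h || st.1.contains c then st
      else
        match pvFindFreeAce st.2 0 num_aces.toNat with
        | some ace => (st.1.insert c (h + 4 * ace), PySem.Set.add st.2 ace)
        | none => st) st1
  let st3 := cs.foldl (fun (st : PySem.Dict Int Int × PySem.Set Int) c =>
      if st.1.contains c then st
      else
        match pvFindFreeAce st.2 0 num_aces.toNat with
        | some ace => (st.1.insert c (h + 4 * ace), PySem.Set.add st.2 ace)
        | none => st) st2
  st3.1

-- the whole 'head_groups … new_t …' block after a best assignment was found
def pvRebuild (colors : List Int) (num_aces : Int) (assignment : List Int) :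
    Option (List (Int × Int)) :=
  let head_groups : PySem.Dict Int (List Int) :=
    (PySem.List.pyRange 0 4 1).foldl (fun d h => d.insert h []) PySem.Dict.empty
  -- for i, c in enumerate(colors): head_groups[best_assignment[i]].append(c)
  -- (the key best_assignment[i] ∈ {0,1,2,3} is always present, modify is exact here)
  let head_groups := (colors.zip assignment).foldl
      (fun d p => d.modify p.2 [] (fun l => l ++ [p.1])) head_groups
  let new_t : PySem.Dict Int Int :=
    head_groups.items.foldl (fun nt p => pvAssignHead num_aces p.1 p.2 nt) PySem.Dict.empty
  if new_t.items.any (fun p => p.2 != p.1) then some new_t.items else none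

-- ===== PORT A =====

-- head_count = [0,0,0,0]; for h in assignment: head_count[h] += 1
-- (h ∈ {0,1,2,3} is always in range, so the total pySetD/pyGetD forms are exact)
def pvBump (hc : List Int) (h : Int) : List Int :=
  PySem.List.pySetD hc h (PySem.List.pyGetD hc h 0 + 1)

def pvHeadCounts (t : List Int) : List Int := t.foldl pvBump [0, 0, 0, 0]

-- the inner 'for c in layer_list' loop with heads_used and break
-- (head_for_color[c]: the key is always present — every layer color is in colors)
def pvLayerScan (hfc : PySem.Dict Int Int) (layer : List Int) (used : PySem.Set Int) : Bool :=
  match layer with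
  | [] => false
  | c :: rest =>
    let h := hfc.getD c 0
    if PySem.Set.contains used h then true else pvLayerScan hfc rest (PySem.Set.add used h)

-- the outer 'for layer_list in layer_lists' loop with break
def pvConflictA (hfc : PySem.Dict Int Int) : List (List Int) → Bool
  | [] => false
  | l :: ls => if pvLayerScan hfc l PySem.Set.empty then true else pvConflictA hfc ls

-- moved = sum(1 for i, c in enumerate(colors) if assignment[i] != current_head[c])
def pvMoved (colors t : List Int) : Int :=
  (colors.zip t).foldl (fun acc p => if p.2 != pvHead p.1 then acc + 1 else acc) 0

-- list(itertools.product(range(4), repeat=n)) in CPython's order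
def pvTuples : Nat → List (List Int)
  | 0 => [[]]
  | k + 1 => (PySem.List.pyRange 0 4 1).flatMap (fun h => (pvTuples k).map (fun t => h :: t))

-- the main 'for assignment in product(…)' loop of A, with its two continues,
-- the strict-improvement update and the moved == 0 break
def pvLoopA (layer_lists : List (List Int)) (colors : List Int) (num_aces : Int) :
    List (List Int) → Option (List Int) × Int → Option (List Int) × Int
  | [], st => st
  | t :: ts, st =>
    if (pvHeadCounts t).any (fun c => decide (c > num_aces)) then
      pvLoopA layer_lists colors num_aces ts st
    else
      let hfc := (colors.zip t).foldl (fun d p => d.insert p.1 p.2) PySem.Dict.empty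
      if pvConflictA hfc layer_lists then pvLoopA layer_lists colors num_aces ts st
      else
        let moved := pvMoved colors t
        if moved < st.2 then
          if moved == 0 then (some t, moved)
          else pvLoopA layer_lists colors num_aces ts (some t, moved)
        else pvLoopA layer_lists colors num_aces ts st

def suggest_layer_friendly_remap_py (layer_colors : List (List Int)) (num_aces : Int) :
    Option (List (Int × Int)) :=
  let colors := pvColors layer_colors
  let n := colors.length
  if n = 0 ∨ n > 12 then none
  else
    let layer_lists := layer_colors
    let res := pvLoopA layer_lists colors num_aces (pvTuples n) (none, (n : Int) + 1)
    match res.1 with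
    | none => none
    | some a => pvRebuild colors num_aces a

-- ===== PORT B =====

-- layer_pos = [[colors.index(c) for c in layer] for layer in layer_lists]
-- (colors.index(c) always succeeds: every layer color is in colors)
def pvLayerPos (colors : List Int) (layer_lists : List (List Int)) : List (List Nat) :=
  layer_lists.map (fun layer => layer.map (fun c => (PySem.List.index? colors c).getD 0))

-- the 'for j in poss: if j < i: …' scan with its seen-set
def pvScanPos (p : List Int) (poss : List Nat) (seen : PySem.Set Int) : Bool :=
  match poss with
  | [] => false
  | j :: js =>
    if j < p.length then
      let v := PySem.List.pyGetD p (j : Int) 0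
      if PySem.Set.contains seen v then true else pvScanPos p js (PySem.Set.add seen v)
    else pvScanPos p js seen

-- prefix_bad(prefix)
def pvPrefixBad (num_aces : Int) (layer_pos : List (List Nat)) (p : List Int) : Bool :=
  (PySem.List.pyRange 0 4 1).any (fun h => decide ((PySem.List.count p h : Int) > num_aces)) ||
  layer_pos.any (fun poss => pvScanPos p poss PySem.Set.empty)

-- dfs(prefix, moved), best threaded as the state (best_assignment, best_moved);
-- fuel = n - len(prefix) makes the structural recursion explicit
def pvDfs (colors : List Int) (num_aces : Int) (layer_pos : List (List Nat)) :
    Nat → List Int → Int → Option (List Int) × Int → Option (List Int) × Int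
  | fuel, p, moved, st =>
    if decide (st.2 ≤ moved) || pvPrefixBad num_aces layer_pos p then st
    else
      match fuel with
      | 0 => (some p, moved)
      | fuel + 1 =>
        (PySem.List.pyRange 0 4 1).foldl
          (fun s h =>
            pvDfs colors num_aces layer_pos fuel (p ++ [h])
              (moved + (if h != pvHead (colors.getD p.length 0) then 1 else 0)) s)
          st

def suggest_layer_friendly_remap_py_alt (layer_colors : List (List Int)) (num_aces : Int) :
    Option (List (Int × Int)) :=
  let colors := pvColors layer_colors
  let n := colors.length
  if n = 0 ∨ n > 12 then none
  else
    let layer_lists := layer_colors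
    let layer_pos := pvLayerPos colors layer_lists
    let res := pvDfs colors num_aces layer_pos n [] 0 (none, (n : Int) + 1)
    match res.1 with
    | none => none
    | some a => pvRebuild colors num_aces a

-- ===== PRECONDITION & SPEC =====
def Spec_suggest_layer_friendly_remap_py (layer_colors : List (List Int)) (num_aces : Int) (out : Option (List (Int × Int))) : Prop := out = suggest_layer_friendly_remap_py_alt layer_colors num_aces
instance (layer_colors : List (List Int)) (num_aces : Int) (out : Option (List (Int × Int))) : Decidable (Spec_suggest_layer_friendly_remap_py layer_colors num_aces out) := by unfold Spec_suggest_layer_friendly_remap_py; infer_instance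

-- ===== CLAIM (what is proved, stated in full; the proofs are below) =====
def Claim_equal_suggest_layer_friendly_remap_py : Prop := ∀ (layer_colors : List (List Int)) (num_aces : Int), Dom_suggest_layer_friendly_remap_py layer_colors num_aces → Spec_suggest_layer_friendly_remap_py layer_colors num_aces (suggest_layer_friendly_remap_py layer_colors num_aces)

-- ===== LEMMAS AND PROOFS =====

def pvStepA (layer_lists : List (List Int)) (colors : List Int) (num_aces : Int)
    (st : Option (List Int) × Int) (t : List Int) : Option (List Int) × Int :=
  if (pvHeadCounts t).any (fun c => decide (c > num_aces)) then st
  else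
    let hfc := (colors.zip t).foldl (fun d p => d.insert p.1 p.2) PySem.Dict.empty
    if pvConflictA hfc layer_lists then st
    else
      let moved := pvMoved colors t
      if moved < st.2 then (some t, moved) else st
lemma pvMoved_eq (colors t : List Int) :
    pvMoved colors t = ((colors.zip t).countP (fun p => p.2 != pvHead p.1) : Int) := by
  unfold pvMoved
  rw [PySem.List.foldl_if_add_one]
  simp

lemma pvMoved_nonneg (colors t : List Int) : 0 ≤ pvMoved colors t := by
  rw [pvMoved_eq]; positivity

lemma pvStepA_of_nonpos (lls : List (List Int)) (colors : List Int) (na : Int)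
    (o : Option (List Int)) (b : Int) (hb : b ≤ 0) (t : List Int) :
    pvStepA lls colors na (o, b) t = (o, b) := by
  have hm := pvMoved_nonneg colors t
  simp only [pvStepA]
  split_ifs with h1 h2 h3 <;> first | rfl | omega

lemma pvFoldl_id {α β : Type} (f : β → α → β) (st : β) (l : List α)
    (h : ∀ x ∈ l, f st x = st) : l.foldl f st = st := by
  induction l with
  | nil => rfl
  | cons x xs ih =>
    rw [List.foldl_cons, h x (by simp)]
    exact ih (fun y hy => h y (by simp [hy]))

lemma pvLoopA_eq_foldl (lls : List (List Int)) (colors : List Int) (na : Int)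
    (ts : List (List Int)) (st : Option (List Int) × Int) :
    pvLoopA lls colors na ts st = ts.foldl (pvStepA lls colors na) st := by
  induction ts generalizing st with
  | nil => rfl
  | cons t ts ih =>
    rw [pvLoopA, List.foldl_cons]
    simp only [pvStepA]
    split_ifs with h1 h2 h3 h4
    · exact ih st
    · exact ih st
    · -- break: moved == 0
      have h0 : pvMoved colors t = 0 := by simpa using h4
      rw [h0]
      exact (pvFoldl_id _ _ _ (fun x _ => pvStepA_of_nonpos lls colors na _ 0 le_rfl x)).symm
    · exact ih _
    · exact ih st
def pvScanSpec (vals : List Int) (seen : PySem.Set Int) : Bool :=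
  match vals with
  | [] => false
  | v :: vs =>
    if PySem.Set.contains seen v then true else pvScanSpec vs (PySem.Set.add seen v)

lemma pvScanSpec_true_iff (vals : List Int) (seen : PySem.Set Int) :
    pvScanSpec vals seen = true ↔ ¬ (vals.Nodup ∧ ∀ v ∈ vals, v ∉ seen) := by
  induction vals generalizing seen with
  | nil => simp [pvScanSpec]
  | cons v vs ih =>
    rw [pvScanSpec]
    by_cases hv : v ∈ seen
    · simp only [PySem.Set.contains_iff seen v |>.mpr hv, if_true, true_iff]
      intro hc
      exact hc.2 v (by simp) hv
    · have hcf : PySem.Set.contains seen v = false := by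
        rw [Bool.eq_false_iff]
        intro h
        exact hv ((PySem.Set.contains_iff seen v).mp h)
      rw [hcf, if_neg (by simp)]
      rw [ih]
      constructor
      · intro h hc
        apply h
        refine ⟨hc.1.of_cons, fun w hw => ?_⟩
        rw [PySem.Set.mem_add]
        rintro (h1 | rfl)
        · exact hc.2 w (by simp [hw]) h1
        · exact (List.nodup_cons.mp hc.1).1 hw
      · intro h hc
        apply h
        refine ⟨List.nodup_cons.mpr ⟨?_, hc.1⟩, fun w hw hmem => ?_⟩
        · intro hvvs
          exact absurd ((PySem.Set.mem_add seen v v).mpr (Or.inr rfl)) (hc.2 v hvvs)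
        · rcases List.mem_cons.mp hw with rfl | hw'
          · exact hv hmem
          · exact hc.2 w hw' ((PySem.Set.mem_add seen v w).mpr (Or.inl hmem))

lemma pvLayerScan_eq (hfc : PySem.Dict Int Int) (layer : List Int) (seen : PySem.Set Int) :
    pvLayerScan hfc layer seen = pvScanSpec (layer.map (fun c => hfc.getD c 0)) seen := by
  induction layer generalizing seen with
  | nil => rfl
  | cons c rest ih =>
    rw [pvLayerScan, List.map_cons, pvScanSpec]
    split_ifs with h
    · rfl
    · exact ih _

lemma pvScanPos_eq (p : List Int) (poss : List Nat) (seen : PySem.Set Int) :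
    pvScanPos p poss seen =
      pvScanSpec ((poss.filter (fun j => j < p.length)).map (fun j => p.getD j 0)) seen := by
  induction poss generalizing seen with
  | nil => rfl
  | cons j js ih =>
    rw [pvScanPos]
    by_cases hj : j < p.length
    · have : List.filter (fun j => decide (j < p.length)) (j :: js) =
        j :: List.filter (fun j => decide (j < p.length)) js := by
        simp [hj]
      rw [this, List.map_cons, pvScanSpec]
      simp only [hj, if_true, PySem.List.pyGetD_natCast]
      split_ifs with h
      · rfl
      · exact ih _
    · have : List.filter (fun j => decide (j < p.length)) (j :: js) =
        List.filter (fun j => decide (j < p.length)) js := by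
        simp [hj]
      rw [this]
      simp only [hj, if_false]
      exact ih seen

lemma pvConflictA_eq_any (hfc : PySem.Dict Int Int) (lls : List (List Int)) :
    pvConflictA hfc lls = lls.any (fun l => pvLayerScan hfc l PySem.Set.empty) := by
  induction lls with
  | nil => rfl
  | cons l ls ih =>
    rw [pvConflictA, List.any_cons]
    cases h : pvLayerScan hfc l PySem.Set.empty
    · simp [ih]
    · simp

lemma pvZip_take (colors p : List Int) :
    colors.zip p = (colors.take p.length).zip p := by
  induction p generalizing colors with
  | nil => simp
  | cons x p ih =>
    cases colors with
    | nil => simp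
    | cons c cs =>
      simp only [List.zip_cons_cons, List.length_cons, List.take_succ_cons]
      rw [ih]

lemma pvZip_split (colors p e : List Int) (h : p.length ≤ colors.length) :
    colors.zip (p ++ e) = (colors.take p.length).zip p ++ (colors.drop p.length).zip e := by
  induction p generalizing colors with
  | nil => simp
  | cons x p ih =>
    cases colors with
    | nil => simp at h
    | cons c cs =>
      simp only [List.cons_append, List.zip_cons_cons, List.length_cons, List.take_succ_cons,
        List.drop_succ_cons]
      rw [ih cs (by simpa using h)]

lemma pvMoved_append (colors p e : List Int) (h : p.length ≤ colors.length) :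
    pvMoved colors (p ++ e) = pvMoved colors p +
      (((colors.drop p.length).zip e).countP (fun q => q.2 != pvHead q.1) : Int) := by
  rw [pvMoved_eq, pvMoved_eq, pvZip_split colors p e h, List.countP_append,
    pvZip_take colors p]
  push_cast
  ring

lemma pvMoved_le_append (colors p e : List Int) (h : p.length ≤ colors.length) :
    pvMoved colors p ≤ pvMoved colors (p ++ e) := by
  rw [pvMoved_append colors p e h]
  have h2 := Int.natCast_nonneg (((colors.drop p.length).zip e).countP (fun q => q.2 != pvHead q.1))
  omega
lemma pvMoved_snoc (colors p : List Int) (h : p.length < colors.length) (x : Int) :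
    pvMoved colors (p ++ [x]) =
      pvMoved colors p + (if x != pvHead (colors.getD p.length 0) then 1 else 0) := by
  rw [pvMoved_append colors p [x] (le_of_lt h)]
  have hd : colors.drop p.length = colors[p.length] :: colors.drop (p.length + 1) :=
    (List.getElem_cons_drop h).symm
  rw [hd]
  simp only [List.zip_cons_cons, List.zip_nil_right, List.countP_cons, List.countP_nil]
  rw [List.getD_eq_getElem colors 0 h]
  split_ifs with hx <;> simp

lemma pvBumpFold (t : List Int) (h : ∀ x ∈ t, 0 ≤ x ∧ x < 4) (a0 a1 a2 a3 : Int) :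
    t.foldl pvBump [a0, a1, a2, a3] =
      [a0 + (t.count 0 : Int), a1 + (t.count 1 : Int),
       a2 + (t.count 2 : Int), a3 + (t.count 3 : Int)] := by
  induction t generalizing a0 a1 a2 a3 with
  | nil => simp
  | cons x t ih =>
    have hx := h x (by simp)
    have ht : ∀ y ∈ t, 0 ≤ y ∧ y < 4 := fun y hy => h y (by simp [hy])
    have hx4 : x = 0 ∨ x = 1 ∨ x = 2 ∨ x = 3 := by omega
    rw [List.foldl_cons]
    rcases hx4 with rfl | rfl | rfl | rfl
    · have hb : pvBump [a0, a1, a2, a3] 0 = [a0 + 1, a1, a2, a3] := by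
        simp [pvBump, PySem.List.pySetD_of_nonneg, PySem.List.pyGetD_of_nonneg]
      rw [hb, ih ht]
      simp only [List.count_cons, List.cons.injEq, and_true]
      refine ⟨?_, ?_, ?_, ?_⟩ <;> (push_cast; simp; try ring)
    · have hb : pvBump [a0, a1, a2, a3] 1 = [a0, a1 + 1, a2, a3] := by
        simp [pvBump, PySem.List.pySetD_of_nonneg, PySem.List.pyGetD_of_nonneg]
      rw [hb, ih ht]
      simp only [List.count_cons, List.cons.injEq, and_true]
      refine ⟨?_, ?_, ?_, ?_⟩ <;> (push_cast; simp; try ring)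
    · have hb : pvBump [a0, a1, a2, a3] 2 = [a0, a1, a2 + 1, a3] := by
        simp [pvBump, PySem.List.pySetD_of_nonneg, PySem.List.pyGetD_of_nonneg]
      rw [hb, ih ht]
      simp only [List.count_cons, List.cons.injEq, and_true]
      refine ⟨?_, ?_, ?_, ?_⟩ <;> (push_cast; simp; try ring)
    · have hb : pvBump [a0, a1, a2, a3] 3 = [a0, a1, a2, a3 + 1] := by
        simp [pvBump, PySem.List.pySetD_of_nonneg, PySem.List.pyGetD_of_nonneg]
      rw [hb, ih ht]
      simp only [List.count_cons, List.cons.injEq, and_true]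
      refine ⟨?_, ?_, ?_, ?_⟩ <;> (push_cast; simp; try ring)

lemma pvHeadCounts_eq (t : List Int) (h : ∀ x ∈ t, 0 ≤ x ∧ x < 4) :
    pvHeadCounts t =
      [(t.count 0 : Int), (t.count 1 : Int), (t.count 2 : Int), (t.count 3 : Int)] := by
  have := pvBumpFold t h 0 0 0 0
  simpa [pvHeadCounts] using this

lemma pvCountCheck_eq (t : List Int) (na : Int) (h : ∀ x ∈ t, 0 ≤ x ∧ x < 4) :
    (pvHeadCounts t).any (fun c => decide (c > na)) =
      (PySem.List.pyRange 0 4 1).any (fun h => decide ((PySem.List.count t h : Int) > na)) := by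
  rw [pvHeadCounts_eq t h, show PySem.List.pyRange 0 4 1 = [0, 1, 2, 3] from rfl]
  simp [List.any_cons, PySem.List.count]
lemma pvIndex_spec (colors : List Int) (c : Int) (hc : c ∈ colors) :
    ∃ k, PySem.List.index? colors c = some k ∧ k < colors.length ∧ colors[k]? = some c := by
  obtain ⟨k, hk⟩ := Option.isSome_iff_exists.mp ((PySem.List.index?_isSome_iff colors c).mpr hc)
  obtain ⟨pre, suf, rfl, hlen, -⟩ := (PySem.List.index?_eq_some_iff _ c k).mp hk
  refine ⟨k, hk, ?_, ?_⟩
  · simp [← hlen]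
  · subst hlen
    rw [List.getElem?_append_right le_rfl]
    simp

lemma pvIndex_lt (colors : List Int) (c : Int) (hc : c ∈ colors) :
    (PySem.List.index? colors c).getD 0 < colors.length := by
  obtain ⟨k, hk, hlt, -⟩ := pvIndex_spec colors c hc
  rw [hk]
  simpa using hlt

lemma pvDict_zip_getD (colors t : List Int) (hnd : colors.Nodup)
    (hlen : t.length = colors.length) (c : Int) (hc : c ∈ colors) :
    ((colors.zip t).foldl (fun d p => d.insert p.1 p.2) PySem.Dict.empty).getD c 0 =
      t.getD ((PySem.List.index? colors c).getD 0) 0 := by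
  have hmapfst : (colors.zip t).map Prod.fst = colors :=
    List.map_fst_zip (le_of_eq hlen.symm)
  have hitems : ((colors.zip t).foldl (fun d p => d.insert p.1 p.2) PySem.Dict.empty).items
      = colors.zip t := by
    have := PySem.Dict.items_foldl_insert_fresh (colors.zip t)
      (fun p => p.1) (fun p => p.2) PySem.Dict.empty
      (fun a _ => by simp) (by rw [show (fun (p : Int × Int) => p.1) = Prod.fst from rfl, hmapfst]; exact hnd)
    simpa using this
  have hkeys : ((colors.zip t).foldl (fun d p => d.insert p.1 p.2) PySem.Dict.empty).keys.Nodup := by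
    show (((colors.zip t).foldl (fun d p => d.insert p.1 p.2) PySem.Dict.empty).items.map Prod.fst).Nodup
    rw [hitems, hmapfst]
    exact hnd
  obtain ⟨k, hk, hlt, hget⟩ := pvIndex_spec colors c hc
  have hklt : k < t.length := by omega
  have hmem : (c, t.getD k 0) ∈ colors.zip t := by
    have hkz : k < (colors.zip t).length := by simp [List.length_zip]; omega
    have : (colors.zip t)[k] = (colors[k], t[k]) := List.getElem_zip
    have hcget : colors[k] = c := by
      have := hget
      rw [List.getElem?_eq_getElem hlt] at this
      simpa using this
    have hdget : t.getD k 0 = t[k] := List.getD_eq_getElem t 0 hklt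
    rw [hdget, ← hcget]
    rw [← this]
    exact List.getElem_mem hkz
  have := PySem.Dict.getD_of_mem_items _ (by rw [hitems]; exact hmem) hkeys 0
  rw [this, hk]
  simp
lemma pvConflict_eq (colors t : List Int) (lls : List (List Int)) (hnd : colors.Nodup)
    (hlen : t.length = colors.length)
    (hsub : ∀ l ∈ lls, ∀ c ∈ l, c ∈ colors) :
    pvConflictA ((colors.zip t).foldl (fun d p => d.insert p.1 p.2) PySem.Dict.empty) lls =
      (pvLayerPos colors lls).any (fun poss => pvScanPos t poss PySem.Set.empty) := by
  rw [pvConflictA_eq_any, pvLayerPos, List.any_map]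
  apply PySem.List.any_congr_mem
  intro l hl
  simp only [Function.comp_apply]
  rw [pvLayerScan_eq, pvScanPos_eq]
  have hvals : (l.map (fun c =>
      ((colors.zip t).foldl (fun d p => d.insert p.1 p.2) PySem.Dict.empty).getD c 0)) =
      (((l.map (fun c => (PySem.List.index? colors c).getD 0)).filter
        (fun j => j < t.length)).map (fun j => t.getD j 0)) := by
    have hfil : (l.map (fun c => (PySem.List.index? colors c).getD 0)).filter
        (fun j => j < t.length) = l.map (fun c => (PySem.List.index? colors c).getD 0) := by
      apply List.filter_eq_self.mpr
      intro j hj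
      obtain ⟨c, hcl, rfl⟩ := List.mem_map.mp hj
      have h1 := pvIndex_lt colors c (hsub l hl c hcl)
      simp only [decide_eq_true_eq]
      omega
    rw [hfil, List.map_map]
    apply List.map_congr_left
    intro c hcl
    exact pvDict_zip_getD colors t hnd hlen c (hsub l hl c hcl)
  rw [hvals]
lemma pvStepA_eq (lls : List (List Int)) (colors : List Int) (na : Int) (hnd : colors.Nodup)
    (hsub : ∀ l ∈ lls, ∀ c ∈ l, c ∈ colors)
    (t : List Int) (hlen : t.length = colors.length) (hent : ∀ x ∈ t, 0 ≤ x ∧ x < 4)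
    (st : Option (List Int) × Int) :
    pvStepA lls colors na st t =
      if pvPrefixBad na (pvLayerPos colors lls) t then st
      else if pvMoved colors t < st.2 then (some t, pvMoved colors t) else st := by
  simp only [pvStepA, pvPrefixBad]
  rw [pvCountCheck_eq t na hent, pvConflict_eq colors t lls hnd hlen hsub]
  rcases Bool.eq_false_or_eq_true ((PySem.List.pyRange 0 4 1).any
      (fun h => decide ((PySem.List.count t h : Int) > na))) with h1 | h1 <;>
    rcases Bool.eq_false_or_eq_true ((pvLayerPos colors lls).any
      (fun poss => pvScanPos t poss PySem.Set.empty)) with h2 | h2 <;>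
      simp only [h1, h2] <;> simp

lemma pvPrefixBad_mono (na : Int) (lp : List (List Nat)) (p e : List Int)
    (h : pvPrefixBad na lp p = true) : pvPrefixBad na lp (p ++ e) = true := by
  simp only [pvPrefixBad, Bool.or_eq_true, List.any_eq_true] at h ⊢
  rcases h with ⟨h0, hh, hgt⟩ | ⟨poss, hposs, hscan⟩
  · left
    refine ⟨h0, hh, ?_⟩
    simp only [decide_eq_true_eq] at hgt ⊢
    have : PySem.List.count p h0 ≤ PySem.List.count (p ++ e) h0 := by
      simp only [PySem.List.count, List.count_append]
      omega
    omega
  · right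
    refine ⟨poss, hposs, ?_⟩
    rw [pvScanPos_eq] at hscan ⊢
    rw [pvScanSpec_true_iff] at hscan ⊢
    intro hc
    apply hscan
    have hsubl : ((poss.filter (fun j => j < p.length)).map (fun j => p.getD j 0)).Sublist
        ((poss.filter (fun j => j < (p ++ e).length)).map (fun j => (p ++ e).getD j 0)) := by
      have hfil : (poss.filter (fun j => j < p.length)).Sublist
          (poss.filter (fun j => j < (p ++ e).length)) := by
        apply List.monotone_filter_right
        intro a ha
        simp only [decide_eq_true_eq, List.length_append] at ha ⊢
        omega
      have hmapeq : (poss.filter (fun j => j < p.length)).map (fun j => p.getD j 0) =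
          (poss.filter (fun j => j < p.length)).map (fun j => (p ++ e).getD j 0) := by
        apply List.map_congr_left
        intro j hj
        have hjp : j < p.length := by
          have := List.of_mem_filter hj
          simpa using this
        rw [List.getD_eq_getElem p 0 hjp, List.getD_eq_getElem (p ++ e) 0 (by simp; omega)]
        exact (List.getElem_append_left hjp).symm
      rw [hmapeq]
      exact hfil.map _
    exact ⟨hc.1.sublist hsubl, fun v hv => hc.2 v (hsubl.mem hv)⟩

lemma pvTuples_mem (k : Nat) (t : List Int) (h : t ∈ pvTuples k) :
    t.length = k ∧ ∀ x ∈ t, 0 ≤ x ∧ x < 4 := by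
  induction k generalizing t with
  | zero => simp [pvTuples] at h; simp [h]
  | succ k ih =>
    simp only [pvTuples, List.mem_flatMap, List.mem_map] at h
    obtain ⟨h0, hh0, t', ht', rfl⟩ := h
    have hr := PySem.List.mem_pyRange_one.mp hh0
    obtain ⟨hl, he⟩ := ih t' ht'
    refine ⟨by simp [hl], ?_⟩
    intro x hx
    rcases List.mem_cons.mp hx with rfl | hx'
    · omega
    · exact he x hx'

lemma pvDfs_eq (lls : List (List Int)) (colors : List Int) (na : Int) (hnd : colors.Nodup)
    (hsub : ∀ l ∈ lls, ∀ c ∈ l, c ∈ colors) :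
    ∀ (k : Nat) (p : List Int) (st : Option (List Int) × Int),
      p.length + k = colors.length → (∀ x ∈ p, 0 ≤ x ∧ x < 4) →
      pvDfs colors na (pvLayerPos colors lls) k p (pvMoved colors p) st =
        ((pvTuples k).map (fun e => p ++ e)).foldl (pvStepA lls colors na) st := by
  intro k
  induction k with
  | zero =>
    intro p st hlen hent
    rw [pvDfs]
    simp only [pvTuples, List.map_cons, List.map_nil, List.append_nil, List.foldl_cons,
      List.foldl_nil]
    rw [pvStepA_eq lls colors na hnd hsub p (by omega) hent]
    rcases Bool.eq_false_or_eq_true (pvPrefixBad na (pvLayerPos colors lls) p) with hb | hb <;>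
      simp only [hb, Bool.or_false, Bool.or_true, if_true]
    · by_cases hm : pvMoved colors p < st.2
      · rw [if_neg (by simp; omega), if_pos hm, if_neg (by simp)]
      · rw [if_pos (by simp; omega), if_neg hm, if_neg (by simp)]
  | succ k ih =>
    intro p st hlen hent
    rw [pvDfs]
    have hple : p.length ≤ colors.length := by omega
    by_cases hb : (decide (st.2 ≤ pvMoved colors p) ||
        pvPrefixBad na (pvLayerPos colors lls) p) = true
    · -- pruned: every extension's step keeps the state
      rw [if_pos hb]
      symm
      apply pvFoldl_id
      intro t ht
      obtain ⟨e, he, rfl⟩ := List.mem_map.mp ht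
      obtain ⟨helen, hee⟩ := pvTuples_mem (k + 1) e he
      have hentpe : ∀ x ∈ p ++ e, 0 ≤ x ∧ x < 4 := by
        intro x hx
        rcases List.mem_append.mp hx with hx' | hx'
        · exact hent x hx'
        · exact hee x hx'
      rw [pvStepA_eq lls colors na hnd hsub (p ++ e) (by simp; omega) hentpe]
      rcases Bool.or_eq_true_iff.mp hb with hle | hbadp
      · rcases Bool.eq_false_or_eq_true (pvPrefixBad na (pvLayerPos colors lls) (p ++ e))
            with hbe | hbe <;> simp only [hbe, Bool.false_eq_true, if_false, if_true]
        · rw [if_neg]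
          have hm := pvMoved_le_append colors p e hple
          simp only [decide_eq_true_eq] at hle
          omega
      · rw [if_pos (pvPrefixBad_mono na _ p e hbadp)]
    · -- not pruned: rewrite each child via the induction hypothesis
      rw [if_neg hb]
      have hrhs : (pvTuples (k + 1)).map (fun e => p ++ e) =
          (PySem.List.pyRange 0 4 1).flatMap
            (fun h => (pvTuples k).map (fun e => (p ++ [h]) ++ e)) := by
        simp only [pvTuples, List.map_flatMap]
        apply List.flatMap_congr
        intro h0 _
        rw [List.map_map]
        apply List.map_congr_left
        intro e _
        show p ++ (h0 :: e) = p ++ [h0] ++ e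
        rw [List.append_cons]
      rw [hrhs, List.foldl_flatMap]
      refine PySem.List.foldl_congr_mem (PySem.List.pyRange 0 4 1)
        (fun (s : Option (List Int) × Int) h =>
          pvDfs colors na (pvLayerPos colors lls) k (p ++ [h])
            (pvMoved colors p + if (h != pvHead (colors.getD p.length 0)) = true then 1 else 0) s)
        (fun (s : Option (List Int) × Int) (h0 : Int) =>
          ((pvTuples k).map (fun e => (p ++ [h0]) ++ e)).foldl (pvStepA lls colors na) s)
        st ?_
      intro s h0 hh0
      have hr := PySem.List.mem_pyRange_one.mp hh0
      have hsnoc := pvMoved_snoc colors p (by omega) h0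
      simp only []
      rw [← hsnoc]
      exact ih (p ++ [h0]) s (by simp; omega)
        (fun x hx => by
          rcases List.mem_append.mp hx with hx' | hx'
          · exact hent x hx'
          · simp at hx'; omega)

-- ===== VERDICT (by name: the statement is the Claim_ definition above) =====
theorem suggest_layer_friendly_remap_py_spec : Claim_equal_suggest_layer_friendly_remap_py := by
  intro lc na _
  unfold Spec_suggest_layer_friendly_remap_py
  simp only [suggest_layer_friendly_remap_py, suggest_layer_friendly_remap_py_alt]
  by_cases hg : (pvColors lc).length = 0 ∨ (pvColors lc).length > 12
  · rw [if_pos hg, if_pos hg]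
  · rw [if_neg hg, if_neg hg]
    have hnd : (pvColors lc).Nodup :=
      ((PySem.List.sorted_perm _ _ _).nodup_iff).mpr (PySem.Set.nodup_ofList _)
    have hsub : ∀ l ∈ lc, ∀ c ∈ l, c ∈ pvColors lc := by
      intro l hl c hc
      exact ((PySem.List.sorted_perm _ _ _).mem_iff).mpr
        ((PySem.Set.mem_ofList _ c).mpr (List.mem_flatMap.mpr ⟨l, hl, hc⟩))
    have h0 : pvMoved (pvColors lc) [] = 0 := by rw [pvMoved_eq]; simp
    have hkey : pvLoopA lc (pvColors lc) na (pvTuples (pvColors lc).length)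
          (none, ((pvColors lc).length : Int) + 1) =
        pvDfs (pvColors lc) na (pvLayerPos (pvColors lc) lc) (pvColors lc).length [] 0
          (none, ((pvColors lc).length : Int) + 1) := by
      rw [pvLoopA_eq_foldl, ← h0,
        pvDfs_eq lc (pvColors lc) na hnd hsub (pvColors lc).length [] _ (by simp) (by simp)]
      simp
    rw [hkey]
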